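-- pv_equiv track=rewrite | github.com/danilo-bangitjr-rlcore/cpp-ci-dev | corerl/tests/medium/interaction/test_checkpoints.py | check_powers_of_two
-- ===== SOURCE A (Python) =====
-- def check_powers_of_two(numbers: list[int], max_power: int):
--     """
--     Check if the list contains all powers of 2 smaller than 2^max_power.
--     """
--     # Find the exponent n where 2^n = max_power
--     n = 0
--     temp = max_power
--     while temp > 1:
--         temp //= 2
--         n += 1
--
--     # Check for each power of 2 less than max_power
--     for i in range(n):
--         power = 2 ** i
--         if power not in numbers:
--             return False
--
--     return True
-- ===== SOURCE B (Python) =====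
-- def check_powers_of_two(numbers: list[int], max_power: int):
--     """
--     Check if the list contains all powers of 2 smaller than 2^max_power.
--     """
--     # limit = 2^n where n = floor(log2(max_power)) (0 if max_power <= 1)
--     n = max_power.bit_length() - 1 if max_power > 1 else 0
--     limit = 1 << n
--     # one pass over the list: OR every power of two below limit into a bitmask
--     # (divisors of limit are exactly the powers of two <= limit)
--     mask = 0
--     for x in numbers:
--         if 0 < x < limit and limit % x == 0:
--             mask |= x
--     # all powers 2^0 .. 2^(n-1) present  <=>  mask has all n low bits set
--     return mask == limit - 1
-- ===== Notes on version B (the rewrite author's own statement) =====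
-- stated objective: alternative
-- what changed: Instead of looping over every exponent and scanning the list for each power (membership test per exponent, early exit), B makes ONE pass over the list, OR-ing each element that is a power of two below the limit (recognised by limit % x == 0) into a bitmask, and compares the mask with limit-1; the exponent count comes from bit_length instead of a halving loop.
import Mathlib
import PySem

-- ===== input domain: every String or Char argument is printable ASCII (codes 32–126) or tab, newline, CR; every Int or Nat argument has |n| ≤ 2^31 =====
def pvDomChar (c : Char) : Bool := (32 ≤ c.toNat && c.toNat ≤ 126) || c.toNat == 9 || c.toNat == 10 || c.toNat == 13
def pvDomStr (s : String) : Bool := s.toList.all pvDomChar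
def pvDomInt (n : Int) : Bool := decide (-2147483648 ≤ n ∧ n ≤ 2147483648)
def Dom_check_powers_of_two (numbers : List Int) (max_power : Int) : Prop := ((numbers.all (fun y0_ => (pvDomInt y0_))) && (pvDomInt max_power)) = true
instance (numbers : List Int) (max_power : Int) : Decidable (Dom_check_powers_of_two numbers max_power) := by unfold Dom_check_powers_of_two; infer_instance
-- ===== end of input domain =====

-- B replaces A's per-exponent membership scans by ONE pass over the list that ORs every
-- power of two below the limit into a bitmask and compares the mask with limit-1.

-- ===== PORT A =====
-- the 'while temp > 1: temp //= 2; n += 1' loop of A, returning the count n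
def pvNLoop (temp : Int) : Nat :=
  if 1 < temp then pvNLoop (PySem.Int.floordiv temp 2) + 1 else 0
termination_by temp.toNat
decreasing_by
  rename_i h
  rw [PySem.Int.floordiv_eq_ediv_of_pos (by omega)]
  omega

-- the 'for i in range(n): … return False' loop of A (early return on a missing power)
def pvAFor (numbers : List Int) : List Nat → Bool
  | [] => true
  | i :: rest => if ((2 : Int) ^ i) ∈ numbers then pvAFor numbers rest else false

def check_powers_of_two (numbers : List Int) (max_power : Int) : Bool :=
  pvAFor numbers (List.range (pvNLoop max_power))

-- ===== PORT B =====
-- the 'for x in numbers: if 0 < x < limit and limit % x == 0: mask |= x' loop of Source B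
def pvBMask (numbers : List Int) (limit : Int) : Int :=
  numbers.foldl
    (fun mask x =>
      if 0 < x ∧ x < limit ∧ PySem.Int.mod limit x = 0 then Int.lor mask x else mask) 0

def check_powers_of_two_alt (numbers : List Int) (max_power : Int) : Bool :=
  -- 'max_power.bit_length() - 1 if max_power > 1 else 0'
  let n : Nat := if 1 < max_power then PySem.Int.bitLength max_power - 1 else 0
  -- 'limit = 1 << n' (1 << n = 2^n, exact since n : Nat)
  let limit : Int := 2 ^ n
  decide (pvBMask numbers limit = limit - 1)

-- ===== PRECONDITION & SPEC =====
def Spec_check_powers_of_two (numbers : List Int) (max_power : Int) (out : Bool) : Prop := out = check_powers_of_two_alt numbers max_power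
instance (numbers : List Int) (max_power : Int) (out : Bool) : Decidable (Spec_check_powers_of_two numbers max_power out) := by unfold Spec_check_powers_of_two; infer_instance

-- ===== CLAIM (what is proved, stated in full; the proofs are below) =====
def Claim_equal_check_powers_of_two : Prop := ∀ (numbers : List Int) (max_power : Int), Dom_check_powers_of_two numbers max_power → Spec_check_powers_of_two numbers max_power (check_powers_of_two numbers max_power)

-- ===== LEMMAS AND PROOFS =====

-- A's halving loop computes the exponent n with 2^n ≤ t < 2^(n+1) (for t ≥ 1)
theorem pvNLoop_bounds : ∀ (k : Nat) (t : Int), t.toNat ≤ k → 1 ≤ t →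
    (2 : Int) ^ pvNLoop t ≤ t ∧ t < 2 ^ (pvNLoop t + 1) := by
  intro k
  induction k with
  | zero => intro t hk ht; omega
  | succ k ih =>
    intro t hk ht
    rw [pvNLoop]
    by_cases h1 : 1 < t
    · have hfd : PySem.Int.floordiv t 2 = t / 2 :=
        PySem.Int.floordiv_eq_ediv_of_pos (by omega)
      simp only [if_pos h1]
      rw [hfd]
      have hb := ih (t / 2) (by omega) (by omega)
      constructor
      · calc (2:Int) ^ (pvNLoop (t / 2) + 1) = 2 * 2 ^ pvNLoop (t / 2) := by ring
        _ ≤ 2 * (t / 2) := by linarith [hb.1]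
        _ ≤ t := by omega
      · calc t ≤ 2 * (t / 2) + 1 := by omega
        _ < 2 * 2 ^ (pvNLoop (t / 2) + 1) := by linarith [hb.2]
        _ = 2 ^ (pvNLoop (t / 2) + 1 + 1) := by ring
    · simp only [if_neg h1]
      constructor <;> simp <;> omega

-- A's for-loop is the conjunction over the list of exponents
theorem pvAFor_eq_true_iff (numbers : List Int) (l : List Nat) :
    pvAFor numbers l = true ↔ ∀ i ∈ l, (2 : Int) ^ i ∈ numbers := by
  induction l with
  | nil => simp [pvAFor]
  | cons i rest ih =>
    rw [pvAFor]
    by_cases hm : ((2 : Int) ^ i) ∈ numbers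
    · simp [hm, ih]
    · simp [hm]

-- B's n (bit_length - 1) coincides with A's halving count: both are the unique e
-- with 2^e ≤ max_power < 2^(e+1) when max_power > 1, and 0 otherwise
theorem pv_n_eq (max_power : Int) :
    (if 1 < max_power then PySem.Int.bitLength max_power - 1 else 0) = pvNLoop max_power := by
  by_cases h1 : 1 < max_power
  · rw [if_pos h1]
    obtain ⟨hlo, hhi⟩ := pvNLoop_bounds max_power.toNat max_power le_rfl (by omega)
    have hne : max_power ≠ 0 := by omega
    have hbl := PySem.Int.lt_two_pow_bitLength max_power
    have hbl2 := PySem.Int.two_pow_bitLength_le max_power hne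
    have habs : (max_power.natAbs : Int) = max_power := Int.natAbs_of_nonneg (by omega)
    -- both (bitLength - 1) and pvNLoop satisfy 2^e ≤ |mp| < 2^(e+1); conclude equality
    have hbl1 : 1 ≤ PySem.Int.bitLength max_power := by
      by_contra hc
      have : PySem.Int.bitLength max_power = 0 := by omega
      rw [this] at hbl
      omega
    have hA1 : 2 ^ pvNLoop max_power ≤ max_power.natAbs := by
      have h : ((2 ^ pvNLoop max_power : Nat) : Int) ≤ (max_power.natAbs : Int) := by
        rw [habs]
        exact_mod_cast hlo
      exact_mod_cast h
    have hA2 : max_power.natAbs < 2 ^ (pvNLoop max_power + 1) := by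
      have h : ((max_power.natAbs : Nat) : Int) < ((2 ^ (pvNLoop max_power + 1) : Nat) : Int) := by
        rw [habs]
        exact_mod_cast hhi
      exact_mod_cast h
    have hB2 : max_power.natAbs < 2 ^ ((PySem.Int.bitLength max_power - 1) + 1) := by
      have : PySem.Int.bitLength max_power - 1 + 1 = PySem.Int.bitLength max_power := by omega
      rw [this]
      exact hbl
    by_contra hne'
    rcases Nat.lt_or_ge (PySem.Int.bitLength max_power - 1) (pvNLoop max_power) with hlt | hge
    · have : (2:Nat) ^ ((PySem.Int.bitLength max_power - 1) + 1) ≤ 2 ^ pvNLoop max_power :=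
        Nat.pow_le_pow_right (by omega) (by omega)
      omega
    · have hgt : pvNLoop max_power < PySem.Int.bitLength max_power - 1 := by omega
      have : (2:Nat) ^ (pvNLoop max_power + 1) ≤ 2 ^ (PySem.Int.bitLength max_power - 1) :=
        Nat.pow_le_pow_right (by omega) (by omega)
      omega
  · rw [if_neg h1, pvNLoop, if_neg h1]

-- the filter condition of B's pass picks exactly the powers 2^e with e < n
theorem pv_cond_iff (n : Nat) (x : Int) :
    (0 < x ∧ x < 2 ^ n ∧ PySem.Int.mod (2 ^ n) x = 0) ↔ ∃ e < n, x = 2 ^ e := by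
  constructor
  · rintro ⟨hpos, hlt, hmod⟩
    have hdvd : x ∣ (2 : Int) ^ n := (PySem.Int.mod_eq_zero_iff_dvd _ _).mp hmod
    have hdvdN : x.natAbs ∣ (2 ^ n : Int).natAbs := Int.natAbs_dvd_natAbs.mpr hdvd
    have h2n : ((2:Int) ^ n).natAbs = 2 ^ n := by
      simp [Int.natAbs_pow]
    rw [h2n] at hdvdN
    obtain ⟨k, hk, hxk⟩ := (Nat.dvd_prime_pow Nat.prime_two).mp hdvdN
    have hxcast : x = ((2:Nat) ^ k : Nat) := by
      have := Int.natAbs_of_nonneg (le_of_lt hpos)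
      rw [← this, hxk]
    have hklt : k < n := by
      by_contra hc
      have hkn : k = n := by omega
      rw [hxcast, hkn] at hlt
      push_cast at hlt
      omega
    exact ⟨k, hklt, by rw [hxcast]; push_cast; ring⟩
  · rintro ⟨e, hen, rfl⟩
    refine ⟨by positivity, ?_, ?_⟩
    · exact pow_lt_pow_right₀ (by norm_num) hen
    · rw [PySem.Int.mod_eq_zero_iff_dvd]
      exact pow_dvd_pow 2 (le_of_lt hen)

-- B's Int fold equals the corresponding Nat fold (all retained elements are positive)
theorem pvBMask_natCast (n : Nat) :
    ∀ (l : List Int) (m : Nat),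
    l.foldl (fun mask x =>
        if 0 < x ∧ x < (2:Int) ^ n ∧ PySem.Int.mod ((2:Int) ^ n) x = 0
        then Int.lor mask x else mask) (m : Int)
      = ((l.foldl (fun mask x =>
          if 0 < x ∧ x < (2:Int) ^ n ∧ PySem.Int.mod ((2:Int) ^ n) x = 0
          then mask ||| x.toNat else mask) m : Nat) : Int) := by
  intro l
  induction l with
  | nil => intro m; simp
  | cons x rest ih =>
    intro m
    simp only [List.foldl_cons]
    by_cases hc : 0 < x ∧ x < (2:Int) ^ n ∧ PySem.Int.mod ((2:Int) ^ n) x = 0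
    · rw [if_pos hc, if_pos hc]
      have hx : x = (x.toNat : Int) := (Int.toNat_of_nonneg (le_of_lt hc.1)).symm
      have hlor : Int.lor (m : Int) x = ((m ||| x.toNat : Nat) : Int) := by
        rw [hx]; rfl
      rw [hlor, ih]
    · rw [if_neg hc, if_neg hc, ih]

-- testBit of the Nat fold: a bit is set iff some retained element has it set
theorem pv_natfold_testBit (n : Nat) :
    ∀ (l : List Int) (m : Nat) (i : Nat),
    (l.foldl (fun mask x =>
        if 0 < x ∧ x < (2:Int) ^ n ∧ PySem.Int.mod ((2:Int) ^ n) x = 0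
        then mask ||| x.toNat else mask) m).testBit i
      = (m.testBit i || l.any (fun x =>
          decide (0 < x ∧ x < (2:Int) ^ n ∧ PySem.Int.mod ((2:Int) ^ n) x = 0)
            && x.toNat.testBit i)) := by
  intro l
  induction l with
  | nil => intro m i; simp
  | cons x rest ih =>
    intro m i
    simp only [List.foldl_cons, List.any_cons]
    by_cases hc : 0 < x ∧ x < (2:Int) ^ n ∧ PySem.Int.mod ((2:Int) ^ n) x = 0
    · rw [if_pos hc, ih, Nat.testBit_lor]
      simp only [decide_eq_true hc, Bool.true_and, Bool.or_assoc]
    · rw [if_neg hc, ih]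
      simp [hc]

-- the mask comparison is exactly "every power 2^i, i < n, occurs in the list"
theorem pvBMask_eq_iff (numbers : List Int) (n : Nat) :
    (pvBMask numbers ((2:Int) ^ n) = (2:Int) ^ n - 1) ↔
      ∀ i < n, (2 : Int) ^ i ∈ numbers := by
  unfold pvBMask
  have hfold := pvBMask_natCast n numbers 0
  simp only [Nat.cast_zero] at hfold
  rw [hfold]
  set M : Nat := numbers.foldl (fun mask x =>
      if 0 < x ∧ x < (2:Int) ^ n ∧ PySem.Int.mod ((2:Int) ^ n) x = 0
      then mask ||| x.toNat else mask) 0 with hM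
  have hcast : ((M : Int) = (2:Int) ^ n - 1) ↔ M = 2 ^ n - 1 := by
    constructor
    · intro h
      have : (M : Int) = (((2:Nat) ^ n - 1 : Nat) : Int) := by
        rw [h]
        have h1 : (1:Nat) ≤ 2 ^ n := Nat.one_le_two_pow
        push_cast [h1]
        ring
      exact_mod_cast this
    · intro h
      rw [h]
      have h1 : (1:Nat) ≤ 2 ^ n := Nat.one_le_two_pow
      push_cast [h1]
      ring
  rw [hcast]
  constructor
  · intro hEq i hi
    have hbit : M.testBit i = true := by
      rw [hEq, Nat.testBit_two_pow_sub_one]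
      simpa using hi
    rw [hM, pv_natfold_testBit] at hbit
    simp only [Nat.zero_testBit, Bool.false_or, List.any_eq_true] at hbit
    obtain ⟨x, hxmem, hx⟩ := hbit
    rw [Bool.and_eq_true, decide_eq_true_iff] at hx
    obtain ⟨hcond, hbitx⟩ := hx
    obtain ⟨e, hen, rfl⟩ := (pv_cond_iff n x).mp hcond
    have htn : ((2:Int) ^ e).toNat = 2 ^ e := by
      have : (2:Int) ^ e = (((2:Nat) ^ e : Nat) : Int) := by push_cast; ring
      rw [this, Int.toNat_natCast]
    rw [htn, Nat.testBit_two_pow] at hbitx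
    have : e = i := by simpa using hbitx
    subst this
    exact hxmem
  · intro hall
    apply Nat.eq_of_testBit_eq
    intro i
    rw [hM, pv_natfold_testBit, Nat.testBit_two_pow_sub_one]
    simp only [Nat.zero_testBit, Bool.false_or]
    by_cases hi : i < n
    · rw [decide_eq_true hi]
      rw [List.any_eq_true]
      refine ⟨(2:Int) ^ i, hall i hi, ?_⟩
      rw [Bool.and_eq_true, decide_eq_true_iff]
      refine ⟨(pv_cond_iff n _).mpr ⟨i, hi, rfl⟩, ?_⟩
      have htn : ((2:Int) ^ i).toNat = 2 ^ i := by
        have : (2:Int) ^ i = (((2:Nat) ^ i : Nat) : Int) := by push_cast; ring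
        rw [this, Int.toNat_natCast]
      rw [htn, Nat.testBit_two_pow]
      simp
    · rw [decide_eq_false hi, List.any_eq_false]
      intro x hxmem hcontra
      rw [Bool.and_eq_true, decide_eq_true_iff] at hcontra
      obtain ⟨hcond, hbitx⟩ := hcontra
      obtain ⟨e, hen, rfl⟩ := (pv_cond_iff n _).mp hcond
      have htn : ((2:Int) ^ e).toNat = 2 ^ e := by
        have : (2:Int) ^ e = (((2:Nat) ^ e : Nat) : Int) := by push_cast; ring
        rw [this, Int.toNat_natCast]
      rw [htn, Nat.testBit_two_pow] at hbitx
      have : e = i := by simpa using hbitx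
      omega
  
-- ===== VERDICT (by name: the statement is the Claim_ definition above) =====
theorem check_powers_of_two_spec : Claim_equal_check_powers_of_two := by
  intro numbers max_power _
  unfold Spec_check_powers_of_two check_powers_of_two check_powers_of_two_alt
  rw [pv_n_eq]
  rw [Bool.eq_iff_iff, pvAFor_eq_true_iff, decide_eq_true_iff,
    pvBMask_eq_iff numbers (pvNLoop max_power)]
  constructor
  · intro h i hi
    exact h i (List.mem_range.mpr hi)
  · intro h i hi
    exact h i (List.mem_range.mp hi)
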